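-- pv_equiv track=rewrite | github.com/S7rasshofer/Flowgrid | flowgrid_app/window/query_support.py | _serialize_part_detail_rows
-- ===== SOURCE A (Python) =====
-- def _serialize_part_detail_rows(rows: list[tuple[str, str, str, str]]) -> tuple[str, str, str, str]:
--     cleaned = [
--         (
--             str(row[0] or "").strip(),
--             str(row[1] or "").strip(),
--             str(row[2] or "").strip(),
--             str(row[3] or "").strip(),
--         )
--         for row in rows
--         if any(str(piece or "").strip() for piece in row)
--     ]
--     return (
--         " | ".join(row[0] for row in cleaned),
--         " | ".join(row[1] for row in cleaned),
--         " | ".join(row[2] for row in cleaned),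
--         " | ".join(row[3] for row in cleaned),
--     )
-- ===== SOURCE B (Python) =====
-- def _serialize_part_detail_rows(rows: list[tuple[str, str, str, str]]) -> tuple[str, str, str, str]:
--     out0 = out1 = out2 = out3 = ""
--     seen = False
--     for row in reversed(rows):
--         s0 = str(row[0] or "").strip()
--         s1 = str(row[1] or "").strip()
--         s2 = str(row[2] or "").strip()
--         s3 = str(row[3] or "").strip()
--         if s0 or s1 or s2 or s3:
--             if seen:
--                 out0 = s0 + " | " + out0
--                 out1 = s1 + " | " + out1
--                 out2 = s2 + " | " + out2
--                 out3 = s3 + " | " + out3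
--             else:
--                 out0, out1, out2, out3 = s0, s1, s2, s3
--                 seen = True
--     return (out0, out1, out2, out3)
-- ===== Notes on version B (the rewrite author's own statement) =====
-- stated objective: alternative
-- what changed: Single reverse-order pass that builds the four pipe-delimited output strings directly by string concatenation with a seen-flag, instead of A's cleaned-row list rescanned by four column joins.
import Mathlib
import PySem

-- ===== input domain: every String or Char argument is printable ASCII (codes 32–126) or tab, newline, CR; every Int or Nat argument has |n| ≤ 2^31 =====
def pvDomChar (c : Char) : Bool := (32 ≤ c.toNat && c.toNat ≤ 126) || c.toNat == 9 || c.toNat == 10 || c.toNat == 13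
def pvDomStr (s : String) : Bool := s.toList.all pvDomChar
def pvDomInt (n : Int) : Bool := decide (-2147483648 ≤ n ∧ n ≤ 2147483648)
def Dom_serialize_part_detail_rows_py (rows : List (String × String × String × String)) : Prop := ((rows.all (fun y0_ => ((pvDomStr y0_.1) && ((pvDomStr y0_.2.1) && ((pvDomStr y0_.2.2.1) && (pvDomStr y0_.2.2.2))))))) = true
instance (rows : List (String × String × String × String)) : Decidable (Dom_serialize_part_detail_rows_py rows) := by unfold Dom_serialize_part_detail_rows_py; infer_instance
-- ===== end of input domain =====

-- B replaces A's build-cleaned-rows-then-join-four-columns with a single reverse traversal that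
-- builds the four pipe-delimited strings directly by concatenation (no intermediate lists, no join).

-- ===== PORT A =====
-- any(str(piece or "").strip() for piece in row): a stripped piece is truthy iff nonempty
def pvKeepA (row : String × String × String × String) : Bool :=
  !(PySem.Str.strip row.1 == "") || !(PySem.Str.strip row.2.1 == "") ||
  !(PySem.Str.strip row.2.2.1 == "") || !(PySem.Str.strip row.2.2.2 == "")

def pvStripRow (row : String × String × String × String) : String × String × String × String :=
  (PySem.Str.strip row.1, PySem.Str.strip row.2.1, PySem.Str.strip row.2.2.1, PySem.Str.strip row.2.2.2)

def serialize_part_detail_rows_py (rows : List (String × String × String × String)) : String × String × String × String :=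
  let cleaned := (rows.filter pvKeepA).map pvStripRow
  ( PySem.Str.join " | " (cleaned.map (·.1)),
    PySem.Str.join " | " (cleaned.map (·.2.1)),
    PySem.Str.join " | " (cleaned.map (·.2.2.1)),
    PySem.Str.join " | " (cleaned.map (·.2.2.2)) )

-- ===== PORT B =====
-- loop body: strip the four fields; if any is nonempty, prepend them (with " | " once something
-- was already seen) to the four output strings
def pvStepB (acc : (String × String × String × String) × Bool)
    (row : String × String × String × String) :
    (String × String × String × String) × Bool :=
  let s0 := PySem.Str.strip row.1
  let s1 := PySem.Str.strip row.2.1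
  let s2 := PySem.Str.strip row.2.2.1
  let s3 := PySem.Str.strip row.2.2.2
  if !(s0 == "") || !(s1 == "") || !(s2 == "") || !(s3 == "") then
    (if acc.2 then
        (s0 ++ " | " ++ acc.1.1, s1 ++ " | " ++ acc.1.2.1,
         s2 ++ " | " ++ acc.1.2.2.1, s3 ++ " | " ++ acc.1.2.2.2)
      else (s0, s1, s2, s3), true)
  else acc

-- for row in reversed(rows): …  then return the four accumulated strings
def serialize_part_detail_rows_py_alt (rows : List (String × String × String × String)) : String × String × String × String :=
  (rows.reverse.foldl pvStepB ((("", "", "", ""), false))).1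

-- ===== PRECONDITION & SPEC =====
def Spec_serialize_part_detail_rows_py (rows : List (String × String × String × String)) (out : String × String × String × String) : Prop := out = serialize_part_detail_rows_py_alt rows
instance (rows : List (String × String × String × String)) (out : String × String × String × String) : Decidable (Spec_serialize_part_detail_rows_py rows out) := by unfold Spec_serialize_part_detail_rows_py; infer_instance

-- ===== CLAIM (what is proved, stated in full; the proofs are below) =====
def Claim_equal_serialize_part_detail_rows_py : Prop := ∀ (rows : List (String × String × String × String)), Dom_serialize_part_detail_rows_py rows → Spec_serialize_part_detail_rows_py rows (serialize_part_detail_rows_py rows)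

-- ===== LEMMAS AND PROOFS =====
lemma pvJoin_nil (sep : String) : PySem.Str.join sep [] = "" :=
  String.toList_injective (by simp [PySem.Str.toList_join, PySem.Chars.join_nil])

lemma pvJoin_singleton (sep x : String) : PySem.Str.join sep [x] = x :=
  String.toList_injective (by simp [PySem.Str.toList_join, PySem.Chars.join_singleton])

lemma pvJoin_cons (sep x : String) (xs : List String) (h : xs ≠ []) :
    PySem.Str.join sep (x :: xs) = x ++ sep ++ PySem.Str.join sep xs := by
  cases xs with
  | nil => exact absurd rfl h
  | cons y ys =>
    exact String.toList_injective
      (by simp [PySem.Str.toList_join, PySem.Chars.join_cons_cons, String.toList_append])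

lemma pvFoldr_pvStepB (rows : List (String × String × String × String)) :
    rows.foldr (fun r a => pvStepB a r) ((("", "", "", ""), false)) =
      ( ( PySem.Str.join " | " (((rows.filter pvKeepA).map pvStripRow).map (·.1)),
          PySem.Str.join " | " (((rows.filter pvKeepA).map pvStripRow).map (·.2.1)),
          PySem.Str.join " | " (((rows.filter pvKeepA).map pvStripRow).map (·.2.2.1)),
          PySem.Str.join " | " (((rows.filter pvKeepA).map pvStripRow).map (·.2.2.2)) ),
        !((rows.filter pvKeepA).map pvStripRow).isEmpty ) := by
  induction rows with
  | nil => simp [pvJoin_nil]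
  | cons r rs ih =>
    by_cases hk : pvKeepA r = true
    · rw [List.foldr_cons, ih]
      have hcond : (!(PySem.Str.strip r.1 == "") || !(PySem.Str.strip r.2.1 == "") ||
          !(PySem.Str.strip r.2.2.1 == "") || !(PySem.Str.strip r.2.2.2 == "")) = true := hk
      by_cases he : (rs.filter pvKeepA) = []
      · rw [he]
        simp [pvStepB, hcond, hk, he, pvJoin_singleton, pvStripRow]
      · have hflag : ((rs.filter pvKeepA).map pvStripRow).isEmpty = false := by simp [he]
        simp only [pvStepB, hcond, hflag, List.filter_cons, hk, if_true, List.map_cons]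
        rw [pvJoin_cons _ _ _ (by simp [he]), pvJoin_cons _ _ _ (by simp [he]),
          pvJoin_cons _ _ _ (by simp [he]), pvJoin_cons _ _ _ (by simp [he])]
        simp [pvStripRow]
    · have hcond : (!(PySem.Str.strip r.1 == "") || !(PySem.Str.strip r.2.1 == "") ||
          !(PySem.Str.strip r.2.2.1 == "") || !(PySem.Str.strip r.2.2.2 == "")) = false := by
        unfold pvKeepA at hk; simpa using hk
      rw [List.foldr_cons, ih]
      simp [pvStepB, hcond, hk]

-- ===== VERDICT (by name: the statement is the Claim_ definition above) =====
theorem serialize_part_detail_rows_py_spec : Claim_equal_serialize_part_detail_rows_py := by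
  intro rows _
  unfold Spec_serialize_part_detail_rows_py serialize_part_detail_rows_py serialize_part_detail_rows_py_alt
  rw [List.foldl_reverse, pvFoldr_pvStepB]
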